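-- pv_equiv track=rewrite | github.com/gabrielteixeira021/geneseeker | geneseeker/domain/analysis.py | predict_splice_sites
-- ===== SOURCE A (Python) =====
-- from typing import List, Dict, Any
--
-- def predict_splice_sites(dna_seq: str) -> Dict[str, List[int]]:
--     """
--     Prediz potenciais sítios de splicing (GT-AG) dentro de um DNA.
--
--     Args:
--         dna_seq: Sequência de DNA da ORF.
--
--     Returns:
--         Dict: Listas de posições de doadores e aceitadores.
--     """
--     donor_sites = []
--     acceptor_sites = []
--
--     for i in range(len(dna_seq) - 1):
--         dinucleotide = dna_seq[i : i + 2].upper()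
--         if dinucleotide == "GT":
--             donor_sites.append(i)
--         elif dinucleotide == "AG":
--             acceptor_sites.append(i)
--
--     return {
--         "donor_sites": donor_sites,
--         "acceptor_sites": acceptor_sites
--     }
-- ===== SOURCE B (Python) =====
-- def predict_splice_sites(dna_seq: str):
--     s = dna_seq.upper()
--
--     def find_all(pat):
--         out = []
--         i = s.find(pat)
--         while i != -1:
--             out.append(i)
--             i = s.find(pat, i + 1)
--         return out
--
--     return {"donor_sites": find_all("GT"), "acceptor_sites": find_all("AG")}
-- ===== Notes on version B (the rewrite author's own statement) =====
-- stated objective: faster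
-- what changed: B upper-cases the sequence once and collects each site kind with a repeated str.find substring search that jumps from occurrence to occurrence, instead of A's single indexed Python-level loop that slices and upper-cases a two-character window at every position; the per-position interpreter work is replaced by C-level substring scans.
import Mathlib
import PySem

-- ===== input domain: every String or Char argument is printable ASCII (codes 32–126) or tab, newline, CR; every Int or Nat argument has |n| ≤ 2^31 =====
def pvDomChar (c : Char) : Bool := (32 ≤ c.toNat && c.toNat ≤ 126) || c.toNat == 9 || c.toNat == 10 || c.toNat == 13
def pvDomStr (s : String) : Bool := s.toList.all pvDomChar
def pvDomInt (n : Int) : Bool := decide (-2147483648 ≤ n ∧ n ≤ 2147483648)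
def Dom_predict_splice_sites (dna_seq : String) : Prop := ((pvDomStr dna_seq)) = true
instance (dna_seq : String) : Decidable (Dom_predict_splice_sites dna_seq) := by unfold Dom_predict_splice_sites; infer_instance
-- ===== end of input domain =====

-- B upper-cases the sequence once and collects each site kind by a repeated substring search
-- (find, then find from the last hit + 1) instead of A's indexed loop that slices and
-- upper-cases a two-character window at every position (objective: faster, measured constant-factor).

-- ===== PORT A =====
def predict_splice_sites (dna_seq : String) : List (String × List Int) :=
  let cs := dna_seq.toList
  let res := (PySem.List.pyRange 0 ((cs.length : Int) - 1) 1).foldl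
    (fun (st : List Int × List Int) i =>
      let dinucleotide := PySem.Chars.upper (PySem.List.slice cs (some i) (some (i + 2)))
      if dinucleotide = "GT".toList then (st.1 ++ [i], st.2)
      else if dinucleotide = "AG".toList then (st.1, st.2 ++ [i])
      else st) ([], [])
  [("donor_sites", res.1), ("acceptor_sites", res.2)]

-- ===== PORT B =====
-- the while loop `i = s.find(pat); while i != -1: out.append(i); i = s.find(pat, i + 1)`;
-- the fuel argument (|s| + 1 suffices, the search position strictly increases) only makes it total
def pvFindAll (s pat : List Char) : Nat → Int → List Int
  | 0, _ => []
  | fuel + 1, start =>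
    let i := PySem.Chars.findFrom s pat start none
    if i = -1 then [] else i :: pvFindAll s pat fuel (i + 1)

def predict_splice_sites_alt (dna_seq : String) : List (String × List Int) :=
  let s := PySem.Chars.upper dna_seq.toList
  [("donor_sites", pvFindAll s "GT".toList (s.length + 1) 0),
   ("acceptor_sites", pvFindAll s "AG".toList (s.length + 1) 0)]

-- ===== PRECONDITION & SPEC =====
def Spec_predict_splice_sites (dna_seq : String) (out : List (String × List Int)) : Prop := out = predict_splice_sites_alt dna_seq
instance (dna_seq : String) (out : List (String × List Int)) : Decidable (Spec_predict_splice_sites dna_seq out) := by unfold Spec_predict_splice_sites; infer_instance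

-- ===== CLAIM (what is proved, stated in full; the proofs are below) =====
def Claim_equal_predict_splice_sites : Prop := ∀ (dna_seq : String), Dom_predict_splice_sites dna_seq → Spec_predict_splice_sites dna_seq (predict_splice_sites dna_seq)

-- ===== LEMMAS AND PROOFS =====

-- A's loop, unrolled: the two accumulated lists are filterMaps over the index range.
theorem pvLoopA (cs : List Char) (l : List Int) (d a : List Int) :
    l.foldl (fun (st : List Int × List Int) i =>
      if PySem.Chars.upper (PySem.List.slice cs (some i) (some (i + 2))) = ['G', 'T'] then (st.1 ++ [i], st.2)
      else if PySem.Chars.upper (PySem.List.slice cs (some i) (some (i + 2))) = ['A', 'G'] then (st.1, st.2 ++ [i])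
      else st) (d, a)
    = (d ++ l.filterMap (fun i =>
          if PySem.Chars.upper (PySem.List.slice cs (some i) (some (i + 2))) = ['G', 'T'] then some i else none),
       a ++ l.filterMap (fun i =>
          if PySem.Chars.upper (PySem.List.slice cs (some i) (some (i + 2))) = ['A', 'G'] then some i else none)) := by
  induction l generalizing d a with
  | nil => simp
  | cons x xs ih =>
    simp only [List.foldl_cons, List.filterMap_cons]
    by_cases h1 : PySem.Chars.upper (PySem.List.slice cs (some x) (some (x + 2))) = ['G', 'T']
    · have h2 : ¬ PySem.Chars.upper (PySem.List.slice cs (some x) (some (x + 2))) = ['A', 'G'] := by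
        rw [h1]; decide
      simp [h1, ih]
    · by_cases h2 : PySem.Chars.upper (PySem.List.slice cs (some x) (some (x + 2))) = ['A', 'G']
      · simp [h2, ih]
      · simp [h1, h2, ih]

-- B's find-jump loop enumerates, in order, every position where pat is a prefix of the rest.
theorem pvFindAll_eq (u pat : List Char) (hp : pat.length = 2) :
    ∀ (fuel k : Nat), k ≤ u.length → u.length - k < fuel →
    pvFindAll u pat fuel (k : Int)
      = (List.range' k (u.length - k)).filterMap
          (fun i => if pat <+: u.drop i then some ((i : Int)) else none) := by
  intro fuel
  induction fuel with
  | zero => intro k hk hf; omega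
  | succ f ih =>
    intro k hk hf
    simp only [pvFindAll]
    rw [PySem.Chars.findFrom_natCast u pat k hk]
    by_cases h1 : PySem.Chars.find (u.drop k) pat = -1
    · rw [if_pos h1, if_pos rfl]
      symm
      rw [List.filterMap_eq_nil_iff]
      intro i hi
      rw [List.mem_range'_1] at hi
      rw [if_neg]
      intro hpre
      have hnin : ¬ pat <:+: u.drop k := (PySem.Chars.find_eq_neg_one_iff _ _).mp h1
      apply hnin
      have : pat <+: (u.drop k).drop (i - k) := by
        rwa [List.drop_drop, Nat.add_sub_cancel' hi.1]
      exact this.isInfix.trans (List.drop_suffix _ _).isInfix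
    · rw [if_neg h1]
      have h0 : 0 ≤ PySem.Chars.find (u.drop k) pat := by
        have := PySem.Chars.neg_one_le_find (u.drop k) pat
        omega
      set f0 := PySem.Chars.find (u.drop k) pat with hf0
      obtain ⟨m, hm⟩ : ∃ m : Nat, f0 = (m : Int) := ⟨f0.toNat, (Int.toNat_of_nonneg h0).symm⟩
      have hspec := PySem.Chars.find_spec (s := u.drop k) (sub := pat) h0
      rw [← hf0, hm] at hspec
      simp only [Int.toNat_natCast] at hspec
      obtain ⟨hpre, hmin⟩ := hspec
      rw [List.drop_drop] at hpre
      have hlen : m + k + pat.length ≤ u.length := by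
        have := hpre.length_le
        simp at this
        omega
      have hkm : k + m + 2 ≤ u.length := by omega
      rw [if_neg (by rw [hm]; omega)]
      have hstep : (k : Int) + f0 + 1 = ((k + m + 1 : Nat) : Int) := by rw [hm]; push_cast; ring
      rw [hstep, ih (k + m + 1) (by omega) (by omega)]
      -- split the range at k+m and k+m+1
      have hsplit : List.range' k (u.length - k)
          = List.range' k m ++ (k + m) :: List.range' (k + m + 1) (u.length - (k + m + 1)) := by
        have h2 : List.range' (k + m) (u.length - k - m) = (k + m) :: List.range' (k + m + 1) (u.length - (k + m + 1)) := by
          rw [show u.length - k - m = (u.length - (k + m + 1)) + 1 by omega, List.range'_succ]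
        calc List.range' k (u.length - k)
            = List.range' k (m + (u.length - k - m)) := by congr 1; omega
          _ = List.range' k m ++ List.range' (k + m) (u.length - k - m) := by
              rw [List.range'_append_1]
          _ = _ := by rw [h2]
      rw [hsplit, List.filterMap_append, List.filterMap_cons]
      have hnone : (List.range' k m).filterMap
          (fun i => if pat <+: u.drop i then some ((i : Int)) else none) = [] := by
        rw [List.filterMap_eq_nil_iff]
        intro i hi
        rw [List.mem_range'_1] at hi
        rw [if_neg]
        intro hpi
        exact hmin (i - k) (by omega) (by rwa [List.drop_drop, Nat.add_sub_cancel' hi.1])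
      rw [hnone, if_pos hpre]
      simp [hm]
-- the dinucleotide A tests at a valid position k is pat iff pat is a prefix of the rest
theorem pvCond_eq (cs : List Char) (pat : List Char) (hp : pat.length = 2) (k : Nat) :
    (PySem.Chars.upper (PySem.List.slice cs (some (k : Int)) (some ((k : Int) + 2))) = pat)
    ↔ pat <+: (PySem.Chars.upper cs).drop k := by
  have h2 : ((k : Int) + 2) = ((k : Int) + ((2 : Nat) : Int)) := by norm_num
  rw [h2, PySem.List.slice_natCast_add]
  rw [List.prefix_iff_eq_take, hp]
  constructor
  · intro h
    rw [← h]
    simp [PySem.Chars.upper, List.map_take, List.map_drop]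
  · intro h
    rw [h]
    simp [PySem.Chars.upper, List.map_take, List.map_drop]

-- A's per-position filterMap over range(len-1) equals the prefix-position filterMap over all positions
theorem pvSideA (cs : List Char) (pat : List Char) (hp : pat.length = 2) :
    (PySem.List.pyRange 0 ((cs.length : Int) - 1) 1).filterMap
      (fun i => if PySem.Chars.upper (PySem.List.slice cs (some i) (some (i + 2))) = pat then some i else none)
    = (List.range' 0 cs.length).filterMap
        (fun i => if pat <+: (PySem.Chars.upper cs).drop i then some ((i : Int)) else none) := by
  have hul : (PySem.Chars.upper cs).length = cs.length := by simp [PySem.Chars.upper]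
  rw [PySem.List.pyRange_one, List.filterMap_map]
  have ht : (((cs.length : Int) - 1) - 0).toNat = cs.length - 1 := by omega
  rw [ht, ← List.range_eq_range']
  rcases Nat.eq_zero_or_pos cs.length with h0 | hpos
  · rw [h0]; rfl
  · have hnp : ¬ pat <+: (PySem.Chars.upper cs).drop (cs.length - 1) := by
      intro hpre
      have := hpre.length_le
      rw [List.length_drop, hul, hp] at this
      omega
    have h2 : List.filterMap (fun i => if pat <+: (PySem.Chars.upper cs).drop i then some ((i : Int)) else none)
        [cs.length - 1] = [] := by
      simp [hnp]
    rw [show cs.length = (cs.length - 1) + 1 by omega, List.range_succ, List.filterMap_append,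
        h2, List.append_nil]
    apply List.filterMap_congr
    intro k _
    simp only [Function.comp_apply, Int.zero_add]
    simp only [pvCond_eq cs pat hp k]

theorem pv_main (dna_seq : String) :
    predict_splice_sites dna_seq = predict_splice_sites_alt dna_seq := by
  simp only [predict_splice_sites, predict_splice_sites_alt]
  have hgt : "GT".toList = ['G', 'T'] := rfl
  have hag : "AG".toList = ['A', 'G'] := rfl
  rw [hgt, hag]
  set cs := dna_seq.toList with hcs
  set u := PySem.Chars.upper cs with hu
  have hul : u.length = cs.length := by simp [hu, PySem.Chars.upper]
  have hB : ∀ pat : List Char, pat.length = 2 →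
      pvFindAll u pat (u.length + 1) 0
        = (List.range' 0 cs.length).filterMap
            (fun i => if pat <+: u.drop i then some ((i : Int)) else none) := by
    intro pat hp
    have := pvFindAll_eq u pat hp (u.length + 1) 0 (by omega) (by omega)
    simpa [hul] using this
  rw [pvLoopA]
  simp only [List.nil_append]
  rw [pvSideA cs ['G','T'] rfl, pvSideA cs ['A','G'] rfl, ← hu,
      hB ['G','T'] rfl, hB ['A','G'] rfl]

-- ===== VERDICT (by name: the statement is the Claim_ definition above) =====
theorem predict_splice_sites_spec : Claim_equal_predict_splice_sites := by
  intro dna_seq _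
  exact pv_main dna_seq
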